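-- pv_equiv track=rewrite | github.com/SanyogitaPiya/LLM4TDD-Manual-Vs-Automated | ManualTDD/State Transition Tests/Max Deletions Function TDD.py | max_deletions
-- ===== SOURCE A (Python) =====
-- def max_deletions(s: str) -> int:
--     n = len(s)
--     dp = [1] * n  # Minimum 1 deletion for each position
--
--     for i in range(1, n):
--         for length in range(1, (i + 1) // 2 + 1):
--             # Check if we have a repeat pattern ending at i
--             if s[i - 2 * length + 1:i - length + 1] == s[i - length + 1:i + 1]:
--                 dp[i] = max(dp[i], dp[i - length] + 1)
--
--     return dp[-1]
-- ===== SOURCE B (Python) =====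
-- def max_deletions(s: str) -> int:
--     n = len(s)
--     memo = {}
--
--     def f(i: int) -> int:
--         # max deletions for a repeat-pattern chain ending at index i
--         if i in memo:
--             return memo[i]
--         best = 1
--         for L in range(1, (i + 1) // 2 + 1):
--             if s[i + 1 - 2 * L:i + 1 - L] == s[i + 1 - L:i + 1]:
--                 best = max(best, f(i - L) + 1)
--         memo[i] = best
--         return best
--
--     return f(n - 1)
-- ===== Notes on version B (the rewrite author's own statement) =====
-- stated objective: alternative
-- what changed: Replaces the bottom-up dp array with a top-down memoized recursion f(i) on the same recurrence and returns f(n-1), never materialising the dp list.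
import Mathlib
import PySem

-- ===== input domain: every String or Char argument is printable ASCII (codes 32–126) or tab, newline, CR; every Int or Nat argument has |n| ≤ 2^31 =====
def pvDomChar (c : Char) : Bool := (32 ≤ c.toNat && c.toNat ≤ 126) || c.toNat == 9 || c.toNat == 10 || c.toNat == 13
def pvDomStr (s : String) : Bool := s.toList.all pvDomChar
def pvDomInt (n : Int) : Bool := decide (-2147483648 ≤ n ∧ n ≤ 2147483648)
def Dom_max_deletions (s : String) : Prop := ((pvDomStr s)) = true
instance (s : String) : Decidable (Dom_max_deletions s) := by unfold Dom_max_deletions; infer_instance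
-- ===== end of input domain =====

-- B replaces A's bottom-up dp array with a top-down recursion on the same recurrence (alternative decomposition, same cost).


-- ===== PORT A =====
def max_deletions (s : String) : Int :=
  let cs := s.toList
  let n : Int := cs.length
  let dp : List Int := List.replicate cs.length 1
  let dp := (PySem.List.pyRange 1 n 1).foldl (fun dp i =>
    (PySem.List.pyRange 1 (PySem.Int.floordiv (i + 1) 2 + 1) 1).foldl (fun dp length =>
      if PySem.List.slice cs (some (i - 2 * length + 1)) (some (i - length + 1))
         = PySem.List.slice cs (some (i - length + 1)) (some (i + 1)) then
        PySem.List.pySetD dp i (max (PySem.List.pyGetD dp i 0) (PySem.List.pyGetD dp (i - length) 0 + 1))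
      else dp) dp) dp
  PySem.List.pyGetD dp (-1) 0    -- dp[-1]; IndexError on the empty string is excluded by Pre_

-- ===== PORT B =====
-- f(i) of Source B: memoisation is operational only, ported as plain recursion on i.
def altF (cs : List Char) (i : Nat) : Int :=
  (List.range ((i + 1) / 2)).attach.foldl
    (fun best l =>
      if PySem.List.slice cs (some ((i + 1 - 2 * (l.1 + 1) : Nat) : Int)) (some ((i + 1 - (l.1 + 1) : Nat) : Int))
         = PySem.List.slice cs (some ((i + 1 - (l.1 + 1) : Nat) : Int)) (some ((i + 1 : Nat) : Int))
      then max best (altF cs (i - (l.1 + 1)) + 1) else best) 1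
termination_by i
decreasing_by
  have hl := l.2; simp only [List.mem_range] at hl; omega

def max_deletions_alt (s : String) : Int :=
  let cs := s.toList
  altF cs (cs.length - 1)

-- ===== PRECONDITION & SPEC =====
-- Pre_ excludes only the empty string, on which A's dp[-1] raises IndexError.
def Pre_max_deletions (s : String) : Prop := s.toList ≠ []
instance (s : String) : Decidable (Pre_max_deletions s) := by unfold Pre_max_deletions; infer_instance
def pvWitness_max_deletions : String := "abab"

def Spec_max_deletions (s : String) (out : Int) : Prop := out = max_deletions_alt s
instance (s : String) (out : Int) : Decidable (Spec_max_deletions s out) := by unfold Spec_max_deletions; infer_instance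

-- ===== CLAIM (what is proved, stated in full; the proofs are below) =====
def Claim_equal_max_deletions : Prop := ∀ (s : String), Dom_max_deletions s → Pre_max_deletions s → Spec_max_deletions s (max_deletions s)

-- ===== LEMMAS AND PROOFS =====

-- the dp list after the outer loop has processed indices 1..m-1 (positions < m are final, the rest still 1)
def dpAux (cs : List Char) (n m : Nat) : List Int :=
  (List.range n).map (fun j => if j < m then altF cs j else 1)

-- altF's fold truncated to the first k candidate lengths
def partialBest (cs : List Char) (i k : Nat) : Int :=
  (List.range k).foldl
    (fun best l =>
      if PySem.List.slice cs (some ((i + 1 - 2 * (l + 1) : Nat) : Int)) (some ((i + 1 - (l + 1) : Nat) : Int))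
         = PySem.List.slice cs (some ((i + 1 - (l + 1) : Nat) : Int)) (some ((i + 1 : Nat) : Int))
      then max best (altF cs (i - (l + 1)) + 1) else best) 1

theorem altF_eq_partialBest (cs : List Char) (i : Nat) :
    altF cs i = partialBest cs i ((i + 1) / 2) := by
  rw [altF, partialBest]
  exact List.foldl_attach (l := List.range ((i + 1) / 2))
    (f := fun best l =>
      if PySem.List.slice cs (some ((i + 1 - 2 * (l + 1) : Nat) : Int)) (some ((i + 1 - (l + 1) : Nat) : Int))
         = PySem.List.slice cs (some ((i + 1 - (l + 1) : Nat) : Int)) (some ((i + 1 : Nat) : Int))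
      then max best (altF cs (i - (l + 1)) + 1) else best) (b := 1)

theorem altF_zero (cs : List Char) : altF cs 0 = 1 := by
  rw [altF]; rfl

theorem dpAux_length (cs : List Char) (n m : Nat) : (dpAux cs n m).length = n := by
  simp [dpAux]

theorem dpAux_getElem (cs : List Char) (n m j : Nat) (hj : j < n) :
    (dpAux cs n m)[j]'(by rw [dpAux_length]; exact hj) = if j < m then altF cs j else 1 := by
  simp [dpAux]

theorem dpAux_one (cs : List Char) (n : Nat) : dpAux cs n 1 = List.replicate n 1 := by
  apply List.ext_getElem
  · simp [dpAux_length]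
  · intro j h1 h2
    rw [dpAux_getElem cs n 1 j (by simpa [dpAux_length] using h1), List.getElem_replicate]
    rcases Nat.eq_zero_or_pos j with h | h
    · simp [h, altF_zero]
    · simp [Nat.not_lt.mpr h]

theorem partialBest_zero (cs : List Char) (i : Nat) : partialBest cs i 0 = 1 := rfl

theorem partialBest_succ (cs : List Char) (i k : Nat) :
    partialBest cs i (k + 1) =
      if PySem.List.slice cs (some ((i + 1 - 2 * (k + 1) : Nat) : Int)) (some ((i + 1 - (k + 1) : Nat) : Int))
         = PySem.List.slice cs (some ((i + 1 - (k + 1) : Nat) : Int)) (some ((i + 1 : Nat) : Int))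
      then max (partialBest cs i k) (altF cs (i - (k + 1)) + 1) else partialBest cs i k := by
  rw [partialBest, List.range_succ, List.foldl_append]; rfl

theorem dpAux_set_self (cs : List Char) (n m : Nat) (hm : m < n) :
    (dpAux cs n m).set m 1 = dpAux cs n m := by
  apply List.ext_getElem
  · simp
  · intro j h1 h2
    rw [List.getElem_set]
    split
    · next h => subst h; rw [dpAux_getElem cs n m m hm]; simp
    · rfl

theorem dpAux_set_final (cs : List Char) (n m : Nat) (_hm : m < n) :
    (dpAux cs n m).set m (altF cs m) = dpAux cs n (m + 1) := by
  apply List.ext_getElem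
  · simp [dpAux_length]
  · intro j h1 h2
    have hj : j < n := by simpa [dpAux_length] using h2
    rw [List.getElem_set, dpAux_getElem cs n (m + 1) j hj]
    split
    · next h => subst h; simp
    · next h =>
      rw [dpAux_getElem cs n m j hj]
      rcases Nat.lt_or_ge j m with h' | h'
      · simp [h', Nat.lt_succ_of_lt h']
      · have : ¬ j < m := Nat.not_lt.mpr h'
        have : ¬ j < m + 1 := by omega
        simp [Nat.not_lt.mpr h', this]

-- one inner-loop fold, for i = m, with dp = dpAux cs n m : after k candidate lengths the slot m holds partialBest cs m k
theorem inner_loop (cs : List Char) (n m : Nat) (hm : m < n) :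
    ∀ k, k ≤ (m + 1) / 2 →
      (PySem.List.pyRange 1 ((k : Int) + 1) 1).foldl
        (fun dp length =>
          if PySem.List.slice cs (some ((m : Int) - 2 * length + 1)) (some ((m : Int) - length + 1))
             = PySem.List.slice cs (some ((m : Int) - length + 1)) (some ((m : Int) + 1)) then
            PySem.List.pySetD dp (m : Int) (max (PySem.List.pyGetD dp (m : Int) 0) (PySem.List.pyGetD dp ((m : Int) - length) 0 + 1))
          else dp) (dpAux cs n m)
      = (dpAux cs n m).set m (partialBest cs m k) := by
  intro k
  induction k with
  | zero =>
    intro _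
    rw [show ((0 : Nat) : Int) + 1 = 1 by norm_num, PySem.List.pyRange_one_eq_nil le_rfl,
      List.foldl_nil, partialBest_zero, dpAux_set_self cs n m hm]
  | succ k ih =>
    intro hk
    have hk' : k ≤ (m + 1) / 2 := by omega
    have hL2 : 2 * (k + 1) ≤ m + 1 := by omega
    have hLm : k + 1 ≤ m := by omega
    rw [show (((k : Nat) + 1 : Nat) : Int) + 1 = ((k : Int) + 1) + 1 by push_cast; ring,
      PySem.List.pyRange_one_succ_right (by omega), List.foldl_append, ih hk', List.foldl_cons, List.foldl_nil]
    have e1 : (m : Int) - 2 * ((k : Int) + 1) + 1 = ((m + 1 - 2 * (k + 1) : Nat) : Int) := by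
      rw [Nat.cast_sub hL2]; push_cast; ring
    have e2 : (m : Int) - ((k : Int) + 1) + 1 = ((m + 1 - (k + 1) : Nat) : Int) := by
      rw [Nat.cast_sub (by omega)]; push_cast; ring
    have e3 : (m : Int) + 1 = ((m + 1 : Nat) : Int) := by push_cast; ring
    have e4 : (m : Int) - ((k : Int) + 1) = ((m - (k + 1) : Nat) : Int) := by
      rw [Nat.cast_sub hLm]; push_cast; ring
    rw [e1, e2, e3, e4, partialBest_succ]
    set dpk := (dpAux cs n m).set m (partialBest cs m k) with hdpk
    have hget_m : PySem.List.pyGetD dpk (m : Int) 0 = partialBest cs m k := by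
      rw [PySem.List.pyGetD_natCast, hdpk, List.getD_eq_getElem _ _ (by simp [dpAux_length]; exact hm),
        List.getElem_set_self]
    have hget_ml : PySem.List.pyGetD dpk ((m - (k + 1) : Nat) : Int) 0 = altF cs (m - (k + 1)) := by
      rw [PySem.List.pyGetD_natCast, hdpk, List.getD_eq_getElem _ _ (by simp [dpAux_length]; omega),
        List.getElem_set_ne (by omega)]
      rw [dpAux_getElem cs n m _ (by omega)]
      simp [show m - (k + 1) < m by omega]
    split
    · rw [PySem.List.pySetD_natCast, hget_m, hget_ml, hdpk, List.set_set]
    · rfl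

-- the outer loop up to index m produces dpAux cs n m
theorem outer_loop (cs : List Char) (n : Nat) (hn : n = cs.length) :
    ∀ m, 1 ≤ m → m ≤ n →
      (PySem.List.pyRange 1 (m : Int) 1).foldl
        (fun dp i =>
          (PySem.List.pyRange 1 (PySem.Int.floordiv (i + 1) 2 + 1) 1).foldl
            (fun dp length =>
              if PySem.List.slice cs (some (i - 2 * length + 1)) (some (i - length + 1))
                 = PySem.List.slice cs (some (i - length + 1)) (some (i + 1)) then
                PySem.List.pySetD dp i (max (PySem.List.pyGetD dp i 0) (PySem.List.pyGetD dp (i - length) 0 + 1))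
              else dp) dp) (List.replicate n 1)
      = dpAux cs n m := by
  intro m
  induction m with
  | zero => intro h; omega
  | succ m ih =>
    intro _ hmn
    rcases Nat.eq_zero_or_pos m with hm0 | hm1
    · subst hm0
      rw [show ((1 : Nat) : Int) = 1 by norm_num, PySem.List.pyRange_one_eq_nil le_rfl,
        List.foldl_nil, dpAux_one]
    · have hmn' : m < n := by omega
      rw [show (((m : Nat) + 1 : Nat) : Int) = (m : Int) + 1 by push_cast; ring,
        PySem.List.pyRange_one_succ_right (by exact_mod_cast hm1), List.foldl_append,
        ih hm1 (by omega), List.foldl_cons, List.foldl_nil]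
      have hfd : PySem.Int.floordiv ((m : Int) + 1) 2 = (((m + 1) / 2 : Nat) : Int) := by
        exact_mod_cast PySem.Int.floordiv_natCast (m + 1) 2
      rw [hfd, inner_loop cs n m hmn' ((m + 1) / 2) le_rfl, ← altF_eq_partialBest,
        dpAux_set_final cs n m hmn']

-- ===== VERDICT (by name: the statement is the Claim_ definition above) =====
theorem max_deletions_spec : Claim_equal_max_deletions := by
  intro s _ hpre
  unfold Spec_max_deletions max_deletions max_deletions_alt
  dsimp only
  have hne : s.toList ≠ [] := hpre
  have hn1 : 1 ≤ s.toList.length := List.length_pos_iff.mpr hne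
  rw [outer_loop s.toList s.toList.length rfl s.toList.length hn1 le_rfl]
  have hdne : dpAux s.toList s.toList.length s.toList.length ≠ [] := by
    rw [← List.length_pos_iff, dpAux_length]; omega
  rw [PySem.List.pyGetD_neg_one _ 0 hdne, List.getLast_eq_getElem]
  have hlt : s.toList.length - 1 < s.toList.length := by omega
  simp only [dpAux_length]
  rw [dpAux_getElem s.toList s.toList.length s.toList.length _ hlt]
  simp only [if_pos hlt]
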